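-- pv_equiv track=rewrite | github.com/algo-gogo/algo_study | 프로그래머스/코딩테스트/ssg/one/4.py | check_right_list
-- ===== SOURCE A (Python) =====
-- from itertools import combinations
--
-- def check_right_list(left_sum, right_list):
--     try:
--         right_sum_list = []
--         for i in range(1, len(right_list)):
--             for c in list(combinations(right_list, i)):
--                 if sum(list(c)) == left_sum:
--                     right_sum_list.append(i)
--
--         return max(right_sum_list)
--     except:
--         return 0
-- ===== SOURCE B (Python) =====
-- def check_right_list(left_sum, right_list):
--     n = len(right_list)
--
--     def go(items, acc_sum, size, best):
--         if not items:
--             if acc_sum == left_sum and 0 < size < n and size > best: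
--                 return size
--             return best
--         best = go(items[1:], acc_sum, size, best)
--         return go(items[1:], acc_sum + items[0], size + 1, best)
--
--     return go(right_list, 0, 0, 0)
-- ===== Notes on version B (the rewrite author's own statement) =====
-- stated objective: alternative
-- what changed: Replaces the per-size enumeration through itertools.combinations (materialising every combination list and taking max over collected sizes) by a single recursive include/exclude backtracking pass that carries the running sum, subset size and best admissible size, using O(n) memory instead of materialised combination lists.
import Mathlib
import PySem

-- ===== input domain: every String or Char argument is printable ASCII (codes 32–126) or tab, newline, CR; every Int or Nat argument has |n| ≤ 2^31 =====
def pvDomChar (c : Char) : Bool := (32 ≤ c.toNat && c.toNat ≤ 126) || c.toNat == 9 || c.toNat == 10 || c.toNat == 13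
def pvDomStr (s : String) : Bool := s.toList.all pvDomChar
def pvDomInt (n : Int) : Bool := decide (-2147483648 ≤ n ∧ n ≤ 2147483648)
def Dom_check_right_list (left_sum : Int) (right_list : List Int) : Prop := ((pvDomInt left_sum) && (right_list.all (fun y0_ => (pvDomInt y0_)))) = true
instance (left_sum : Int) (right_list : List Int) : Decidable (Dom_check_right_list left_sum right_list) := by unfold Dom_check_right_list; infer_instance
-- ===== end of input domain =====

-- B replaces A's per-size enumeration through materialised combination lists by one
-- recursive include/exclude backtracking pass carrying sum, size and best; objective: alternative.

-- ===== PORT A =====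
-- itertools.combinations(xs, k), in Python's (lexicographic-by-index) order
def pvCombos : List Int → Nat → List (List Int)
  | _, 0 => [[]]
  | [], _ + 1 => []
  | x :: rest, k + 1 => ((pvCombos rest k).map (fun c => x :: c)) ++ pvCombos rest (k + 1)

def check_right_list (left_sum : Int) (right_list : List Int) : Int :=
  let right_sum_list :=
    (PySem.List.pyRange 1 (right_list.length : Int) 1).foldl
      (fun acc i =>
        (pvCombos right_list i.toNat).foldl
          (fun acc2 c => if c.sum = left_sum then acc2 ++ [i] else acc2) acc)
      []
  match right_sum_list with
  | [] => 0                      -- Python: max([]) raises, caught by the bare except -> 0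
  | x :: t => t.foldl max x      -- Python: max(right_sum_list)

-- ===== PORT B =====
-- recursive include/exclude backtracking carrying running sum, size and best, per Source B
def pvGo (left_sum : Int) (n : Nat) : List Int → Int → Int → Int → Int
  | [], acc_sum, size, best =>
      if acc_sum = left_sum ∧ 0 < size ∧ size < (n : Int) ∧ best < size then size else best
  | x :: rest, acc_sum, size, best =>
      pvGo left_sum n rest (acc_sum + x) (size + 1) (pvGo left_sum n rest acc_sum size best)

def check_right_list_alt (left_sum : Int) (right_list : List Int) : Int :=
  pvGo left_sum right_list.length right_list 0 0 0

-- ===== PRECONDITION & SPEC =====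
def Spec_check_right_list (left_sum : Int) (right_list : List Int) (out : Int) : Prop := out = check_right_list_alt left_sum right_list
instance (left_sum : Int) (right_list : List Int) (out : Int) : Decidable (Spec_check_right_list left_sum right_list out) := by unfold Spec_check_right_list; infer_instance

-- ===== CLAIM (what is proved, stated in full; the proofs are below) =====
def Claim_equal_check_right_list : Prop := ∀ (left_sum : Int) (right_list : List Int), Dom_check_right_list left_sum right_list → Spec_check_right_list left_sum right_list (check_right_list left_sum right_list)

-- ===== LEMMAS AND PROOFS =====

-- 'some subset of xs of size c sums to l'
def GoodN (l : Int) (xs : List Int) (c : Nat) : Prop :=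
  ∃ t : List Int, t.Sublist xs ∧ t.sum = l ∧ t.length = c

theorem mem_pvCombos : ∀ (xs : List Int) (k : Nat) (a : List Int),
    a ∈ pvCombos xs k ↔ a.Sublist xs ∧ a.length = k := by
  intro xs
  induction xs with
  | nil =>
    intro k a
    cases k with
    | zero => simp [pvCombos, List.sublist_nil, List.length_eq_zero_iff]
    | succ k =>
      simp only [pvCombos, List.not_mem_nil, false_iff, not_and, List.sublist_nil]
      rintro rfl; simp
  | cons x rest ih =>
    intro k a
    cases k with
    | zero =>
      simp only [pvCombos, List.mem_singleton, List.length_eq_zero_iff]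
      constructor
      · rintro rfl; exact ⟨List.nil_sublist _, rfl⟩
      · rintro ⟨_, rfl⟩; rfl
    | succ k =>
      simp only [pvCombos, List.mem_append, List.mem_map, ih]
      constructor
      · rintro (⟨b, ⟨hs, hl⟩, rfl⟩ | ⟨hs, hl⟩)
        · exact ⟨List.Sublist.cons₂ x hs, by simp [hl]⟩
        · exact ⟨List.Sublist.cons x hs, hl⟩
      · rintro ⟨hs, hl⟩
        rcases List.sublist_cons_iff.mp hs with h | ⟨r, rfl, hr⟩
        · exact Or.inr ⟨h, hl⟩
        · exact Or.inl ⟨r, ⟨hr, by simpa using hl⟩, rfl⟩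

-- membership in A's right_sum_list
theorem mem_rsl (l : Int) (xs : List Int) (j : Int) :
    j ∈ (PySem.List.pyRange 1 (xs.length : Int) 1).foldl
      (fun acc i =>
        (pvCombos xs i.toNat).foldl
          (fun (acc2 : List Int) (c : List Int) => if c.sum = l then acc2 ++ [i] else acc2) acc)
      ([] : List Int)
    ↔ (1 ≤ j ∧ j < (xs.length : Int) ∧ GoodN l xs j.toNat) := by
  have h1 : ∀ (acc : List Int) (i : Int),
      (pvCombos xs i.toNat).foldl (fun (acc2 : List Int) (c : List Int) => if c.sum = l then acc2 ++ [i] else acc2) acc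
      = acc ++ ((pvCombos xs i.toNat).filter (fun (c : List Int) => decide (c.sum = l))).map (fun _ => i) := by
    intro acc i
    exact PySem.List.foldl_append_ite (fun (c : List Int) => c.sum = l) (fun _ => i) (pvCombos xs i.toNat) acc
  rw [show (fun (acc : List Int) (i : Int) =>
        (pvCombos xs i.toNat).foldl (fun (acc2 : List Int) (c : List Int) => if c.sum = l then acc2 ++ [i] else acc2) acc)
      = (fun acc i => acc ++ ((pvCombos xs i.toNat).filter (fun (c : List Int) => decide (c.sum = l))).map (fun _ => i))
      from funext fun acc => funext fun i => h1 acc i]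
  rw [PySem.List.foldl_append_eq_flatMap]
  simp only [List.nil_append, List.mem_flatMap, List.mem_map, List.mem_filter,
    PySem.List.mem_pyRange_one, decide_eq_true_eq]
  constructor
  · rintro ⟨i, ⟨hi1, hi2⟩, c, ⟨hc, hsum⟩, rfl⟩
    have h := (mem_pvCombos xs i.toNat c).mp hc
    exact ⟨hi1, hi2, c, h.1, hsum, h.2⟩
  · rintro ⟨hj1, hj2, t, hts, hsum, hlen⟩
    exact ⟨j, ⟨hj1, hj2⟩, t, ⟨(mem_pvCombos xs j.toNat t).mpr ⟨hts, hlen⟩, hsum⟩, rfl⟩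

-- the common characterisation both results satisfy
def IsMaxOf (P : Int → Prop) (r : Int) : Prop :=
  (r = 0 ∧ ∀ j, ¬ P j) ∨ (P r ∧ ∀ j, P j → j ≤ r)

theorem isMaxOf_unique (P : Int → Prop) (r1 r2 : Int)
    (h1 : IsMaxOf P r1) (h2 : IsMaxOf P r2) : r1 = r2 := by
  rcases h1 with ⟨e1, n1⟩ | ⟨p1, b1⟩ <;> rcases h2 with ⟨e2, n2⟩ | ⟨p2, b2⟩
  · omega
  · exact absurd p2 (n1 r2)
  · exact absurd p1 (n2 r1)
  · exact le_antisymm (b2 r1 p1) (b1 r2 p2)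

theorem charA (l : Int) (xs : List Int) :
    IsMaxOf (fun j => 1 ≤ j ∧ j < (xs.length : Int) ∧ GoodN l xs j.toNat)
      (check_right_list l xs) := by
  simp only [check_right_list]
  rcases hE : (PySem.List.pyRange 1 (xs.length : Int) 1).foldl
      (fun acc i =>
        (pvCombos xs i.toNat).foldl
          (fun (acc2 : List Int) (c : List Int) => if c.sum = l then acc2 ++ [i] else acc2) acc)
      ([] : List Int) with _ | ⟨x, t⟩
  · left
    refine ⟨by simp [hE], ?_⟩
    intro j hP
    have := (mem_rsl l xs j).mpr hP
    rw [hE] at this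
    simp at this
  · right
    have hmem : ∀ y, y ∈ x :: t → (1 ≤ y ∧ y < (xs.length : Int) ∧ GoodN l xs y.toNat) := by
      intro y hy
      exact (mem_rsl l xs y).mp (by rw [hE]; exact hy)
    have hres : t.foldl max x ∈ x :: t := by
      rcases PySem.List.foldl_max_mem t x with h | h
      · rw [h]; exact List.mem_cons_self
      · exact List.mem_cons_of_mem _ h
    constructor
    · simp only [hE]
      exact hmem _ hres
    · intro j hP
      have hj : j ∈ x :: t := by
        have := (mem_rsl l xs j).mpr hP
        rw [hE] at this; exact this
      simp only [hE]
      rcases List.mem_cons.mp hj with rfl | hj'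
      · exact (PySem.List.le_foldl_max t j).1
      · exact (PySem.List.le_foldl_max t x).2 j hj'

-- ---- B side ----
def CandB (l : Int) (n : Nat) (rest : List Int) (acc size j : Int) : Prop :=
  ∃ t : List Int, t.Sublist rest ∧ acc + t.sum = l ∧ j = size + (t.length : Int) ∧
    0 < j ∧ j < (n : Int)

theorem pvGo_char (l : Int) (n : Nat) : ∀ (rest : List Int) (acc size best : Int),
    (pvGo l n rest acc size best = best ∨
      (CandB l n rest acc size (pvGo l n rest acc size best) ∧
        best < pvGo l n rest acc size best)) ∧
    (∀ j, CandB l n rest acc size j → j ≤ pvGo l n rest acc size best) := by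
  intro rest
  induction rest with
  | nil =>
    intro acc size best
    constructor
    · by_cases h : acc = l ∧ 0 < size ∧ size < (n : Int) ∧ best < size
      · right
        rw [pvGo, if_pos h]
        exact ⟨⟨[], List.nil_sublist _, by simpa using h.1, by simp, h.2.1, h.2.2.1⟩,
          h.2.2.2⟩
      · left
        rw [pvGo, if_neg h]
    · rintro j ⟨t, hts, hsum, hlen, hj0, hjn⟩
      have ht : t = [] := List.sublist_nil.mp hts
      subst ht
      simp only [List.sum_nil, List.length_nil, Nat.cast_zero, add_zero] at hsum hlen
      rw [pvGo]
      by_cases h : acc = l ∧ 0 < size ∧ size < (n : Int) ∧ best < size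
      · rw [if_pos h]; omega
      · rw [if_neg h]
        by_cases hb : best < size
        · exact absurd ⟨hsum, by omega, by omega, hb⟩ h
        · omega
  | cons x rest ih =>
    intro acc size best
    obtain ⟨ih1a, ih1b⟩ := ih acc size best
    obtain ⟨ih2a, ih2b⟩ := ih (acc + x) (size + 1) (pvGo l n rest acc size best)
    rw [show pvGo l n (x :: rest) acc size best
        = pvGo l n rest (acc + x) (size + 1) (pvGo l n rest acc size best) from rfl]
    set b1 := pvGo l n rest acc size best with hb1
    set r := pvGo l n rest (acc + x) (size + 1) b1 with hr
    have hb1le : best ≤ b1 := by rcases ih1a with h | h <;> omega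
    have hrle : b1 ≤ r := by rcases ih2a with h | h <;> omega
    have hcons : ∀ j, CandB l n (x :: rest) acc size j ↔
        (CandB l n rest acc size j ∨ CandB l n rest (acc + x) (size + 1) j) := by
      intro j
      constructor
      · rintro ⟨t, hts, hsum, hlen, hj0, hjn⟩
        rcases List.sublist_cons_iff.mp hts with h | ⟨u, rfl, hu⟩
        · exact Or.inl ⟨t, h, hsum, hlen, hj0, hjn⟩
        · right
          refine ⟨u, hu, ?_, ?_, hj0, hjn⟩
          · simp only [List.sum_cons] at hsum; omega
          · simp only [List.length_cons, Nat.cast_add, Nat.cast_one] at hlen; omega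
      · rintro (⟨t, hts, hsum, hlen, hj0, hjn⟩ | ⟨u, hu, hsum, hlen, hj0, hjn⟩)
        · exact ⟨t, List.Sublist.cons x hts, hsum, hlen, hj0, hjn⟩
        · refine ⟨x :: u, List.Sublist.cons₂ x hu, ?_, ?_, hj0, hjn⟩
          · simp only [List.sum_cons]; omega
          · simp only [List.length_cons, Nat.cast_add, Nat.cast_one]; omega
    constructor
    · rcases ih2a with h2 | ⟨hc2, hlt2⟩
      · rcases ih1a with h1 | ⟨hc1, hlt1⟩
        · left; omega
        · right
          rw [h2]
          exact ⟨(hcons b1).mpr (Or.inl hc1), by omega⟩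
      · right
        exact ⟨(hcons r).mpr (Or.inr hc2), by omega⟩
    · intro j hj
      rcases (hcons j).mp hj with h | h
      · exact le_trans (ih1b j h) hrle
      · exact ih2b j h

theorem charB (l : Int) (xs : List Int) :
    IsMaxOf (fun j => 1 ≤ j ∧ j < (xs.length : Int) ∧ GoodN l xs j.toNat)
      (check_right_list_alt l xs) := by
  obtain ⟨ha, hb⟩ := pvGo_char l xs.length xs 0 0 0
  have hPC : ∀ j, (1 ≤ j ∧ j < (xs.length : Int) ∧ GoodN l xs j.toNat)
      ↔ CandB l xs.length xs 0 0 j := by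
    intro j
    constructor
    · rintro ⟨hj1, hj2, t, hts, hsum, hlen⟩
      exact ⟨t, hts, by omega, by omega, by omega, by omega⟩
    · rintro ⟨t, hts, hsum, hlen, hj0, hjn⟩
      exact ⟨by omega, by omega, t, hts, by omega, by omega⟩
  unfold check_right_list_alt
  rcases ha with h | ⟨hc, _⟩
  · left
    refine ⟨h, ?_⟩
    rintro j hP
    have h1 := hb j ((hPC j).mp hP)
    obtain ⟨hj1, _, _⟩ := hP
    omega
  · right
    exact ⟨(hPC _).mpr hc, fun j hP => hb j ((hPC j).mp hP)⟩

-- ===== VERDICT (by name: the statement is the Claim_ definition above) =====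
theorem check_right_list_spec : Claim_equal_check_right_list := by
  intro l xs _
  unfold Spec_check_right_list
  exact isMaxOf_unique _ _ _ (charA l xs) (charB l xs)
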